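-- pv_equiv track=rewrite | github.com/BagerDiren/devamli | inject_dd_missing.py | find_p_for_anchor
-- ===== SOURCE A (Python) =====
-- def find_p_for_anchor(xml: str, anchor: str) -> int:
--     """Find the position of the <w:p> opening containing the FIRST occurrence of `anchor`."""
--     idx = xml.find(anchor)
--     if idx == -1:
--         return -1
--     p_start = xml.rfind('<w:p>', 0, idx)
--     p_start_alt = xml.rfind('<w:p ', 0, idx)
--     candidates = [c for c in (p_start, p_start_alt) if c != -1]
--     return max(candidates) if candidates else -1
-- ===== SOURCE B (Python) =====
-- def find_p_for_anchor(xml: str, anchor: str) -> int: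
--     """Find the position of the <w:p> opening containing the FIRST occurrence of `anchor`."""
--     idx = xml.find(anchor)
--     if idx == -1:
--         return -1
--     pre = xml[:idx]
--     best = -1
--     for j in range(len(pre) - 4):
--         if pre[j:j+5] in ('<w:p>', '<w:p '):
--             best = j
--     return best
-- ===== Notes on version B (the rewrite author's own statement) =====
-- stated objective: alternative
-- what changed: Replaces the two backward rfind scans plus candidate/max combination by a single forward sliding-window pass over xml[:idx] that keeps the last position whose 5-char window is '<w:p>' or '<w:p '.
import Mathlib
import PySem

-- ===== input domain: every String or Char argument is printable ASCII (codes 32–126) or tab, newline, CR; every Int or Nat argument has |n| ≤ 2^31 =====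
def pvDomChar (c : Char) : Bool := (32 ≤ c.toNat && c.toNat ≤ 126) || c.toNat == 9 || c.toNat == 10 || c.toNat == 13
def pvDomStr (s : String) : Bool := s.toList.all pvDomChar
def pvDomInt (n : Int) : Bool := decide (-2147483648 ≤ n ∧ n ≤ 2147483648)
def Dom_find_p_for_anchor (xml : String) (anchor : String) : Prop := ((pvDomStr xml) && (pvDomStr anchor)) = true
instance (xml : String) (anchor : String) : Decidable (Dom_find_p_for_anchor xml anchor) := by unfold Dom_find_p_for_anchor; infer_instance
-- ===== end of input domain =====

-- B replaces A's two backward rfind scans by one forward sliding-window pass; alternative decomposition, same cost.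

-- ===== PORT A =====
def find_p_for_anchor (xml : String) (anchor : String) : Int :=
  let idx := PySem.Str.find xml anchor
  if idx = -1 then -1
  else
    let p_start := PySem.Str.rfindFrom xml "<w:p>" 0 (some idx)
    let p_start_alt := PySem.Str.rfindFrom xml "<w:p " 0 (some idx)
    let candidates := [p_start, p_start_alt].filter (fun c => c ≠ -1)
    if candidates = [] then -1 else (PySem.List.max? candidates id).getD (-1)

-- ===== PORT B =====
def find_p_for_anchor_alt (xml : String) (anchor : String) : Int :=
  let idx := PySem.Str.find xml anchor
  if idx = -1 then -1
  else
    let pre := PySem.List.slice xml.toList none (some idx)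
    (List.range (pre.length - 4)).foldl
      (fun (best : Int) (j : Nat) =>
        if PySem.List.slice pre (some (j : Int)) (some ((j : Int) + 5)) = "<w:p>".toList ∨
           PySem.List.slice pre (some (j : Int)) (some ((j : Int) + 5)) = "<w:p ".toList
        then (j : Int) else best) (-1)

-- ===== PRECONDITION & SPEC =====
def Spec_find_p_for_anchor (xml : String) (anchor : String) (out : Int) : Prop := out = find_p_for_anchor_alt xml anchor
instance (xml : String) (anchor : String) (out : Int) : Decidable (Spec_find_p_for_anchor xml anchor out) := by unfold Spec_find_p_for_anchor; infer_instance

-- ===== CLAIM (what is proved, stated in full; the proofs are below) =====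
def Claim_equal_find_p_for_anchor : Prop := ∀ (xml : String) (anchor : String), Dom_find_p_for_anchor xml anchor → Spec_find_p_for_anchor xml anchor (find_p_for_anchor xml anchor)

-- ===== LEMMAS AND PROOFS =====

/-- "last match" fold over `range n`. -/
def pvLM (p : Nat → Bool) (n : Nat) : Int :=
  (List.range n).foldl (fun b j => if p j then (j : Int) else b) (-1)

/-- the two window predicates -/
def pvP (pre : List Char) (j : Nat) : Bool := "<w:p>".toList.isPrefixOf (pre.drop j)
def pvQ (pre : List Char) (j : Nat) : Bool := "<w:p ".toList.isPrefixOf (pre.drop j)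

theorem pvLM_succ (p : Nat → Bool) (n : Nat) :
    pvLM p (n + 1) = if p n then (n : Int) else pvLM p n := by
  simp [pvLM, List.range_succ]

theorem pvLM_le (p : Nat → Bool) (n : Nat) : pvLM p n ≤ (n : Int) := by
  induction n with
  | zero => simp [pvLM]
  | succ k ih =>
    rw [pvLM_succ]
    split_ifs <;> push_cast <;> omega

theorem pvLM_neg_one_le (p : Nat → Bool) (n : Nat) : -1 ≤ pvLM p n := by
  induction n with
  | zero => simp [pvLM]
  | succ k ih =>
    rw [pvLM_succ]
    split_ifs <;> omega

theorem pvLM_or (p q : Nat → Bool) (n : Nat) :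
    pvLM (fun j => p j || q j) n = max (pvLM p n) (pvLM q n) := by
  induction n with
  | zero => simp [pvLM]
  | succ k ih =>
    rw [pvLM_succ, pvLM_succ, pvLM_succ, ih]
    have hp := pvLM_le p k
    have hq := pvLM_le q k
    by_cases h1 : p k = true <;> by_cases h2 : q k = true <;>
      simp [h1, h2] <;> omega

theorem pvLM_trunc (p : Nat → Bool) (m : Nat)
    (h : ∀ j, m ≤ j → p j = false) : ∀ n, m ≤ n → pvLM p n = pvLM p m := by
  intro n
  induction n with
  | zero => intro hmn; simp [show m = 0 by omega]
  | succ k ih =>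
    intro hmn
    rcases Nat.lt_or_ge m (k + 1) with hlt | hge
    · rw [pvLM_succ, h k (by omega), ih (by omega)]
      simp
    · simp [show m = k + 1 by omega]

theorem pvGo_eq (s sub : List Char) (k : Nat) :
    PySem.Chars.rfind.go s sub k = pvLM (fun j => sub.isPrefixOf (s.drop j)) (k + 1) := by
  induction k with
  | zero => simp [PySem.Chars.rfind.go, pvLM]
  | succ m ih =>
    rw [pvLM_succ, ← ih, PySem.Chars.rfind.go]

theorem pvRfind_eq (s sub : List Char) :
    PySem.Chars.rfind s sub = pvLM (fun j => sub.isPrefixOf (s.drop j)) (s.length + 1) := by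
  rw [PySem.Chars.rfind, pvGo_eq]

/-- the 5-char window test equals the prefix test, unconditionally -/
theorem pvCond_eq (pre : List Char) (lit : List Char) (hlen : lit.length = 5) (j : Nat) :
    (PySem.List.slice pre (some (j : Int)) (some ((j : Int) + 5)) = lit) ↔ lit.isPrefixOf (pre.drop j) = true := by
  have h5 : ((j : Int) + 5) = ((j : Int) + ((5 : Nat) : Int)) := by norm_num
  rw [h5, PySem.List.slice_natCast_add, List.isPrefixOf_iff_prefix, List.prefix_iff_eq_take, hlen]
  exact ⟨fun h => h.symm, fun h => h.symm⟩

theorem pvRfindFrom_eq_rfind (s sub : List Char) (idx : Int)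
    (hge : 0 ≤ idx) (hle : idx ≤ (s.length : Int)) :
    PySem.Chars.rfindFrom s sub 0 (some idx) = PySem.Chars.rfind (s.take idx.toNat) sub := by
  have h1 : ¬ ((s.length : Int) < idx) := by omega
  have h2 : ¬ (idx < 0) := by omega
  simp only [PySem.Chars.rfindFrom, h1, h2, if_false, lt_self_iff_false]
  split_ifs with h3 <;> simp_all

/-- A's candidates/max step, for values ≥ -1, is just `max`. -/
theorem pvMaxStep (a b : Int) (ha : -1 ≤ a) (hb : -1 ≤ b) :
    (if ([a, b].filter (fun c => c ≠ -1)) = [] then (-1 : Int)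
      else (PySem.List.max? ([a, b].filter (fun c => c ≠ -1)) id).getD (-1)) = max a b := by
  by_cases h1 : a = -1 <;> by_cases h2 : b = -1 <;>
    simp [h1, h2, PySem.List.max?, List.filter]
  · omega
  · omega
  · split_ifs <;> simp [Option.getD] <;> omega

/-- core: A's two backward scans + max = B's single forward pass, over the same prefix -/
theorem pvCore (pre : List Char) :
    (if ([PySem.Chars.rfind pre "<w:p>".toList, PySem.Chars.rfind pre "<w:p ".toList].filter
        (fun c => c ≠ -1)) = [] then (-1 : Int)
      else (PySem.List.max? ([PySem.Chars.rfind pre "<w:p>".toList,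
        PySem.Chars.rfind pre "<w:p ".toList].filter (fun c => c ≠ -1)) id).getD (-1)) =
    (List.range (pre.length - 4)).foldl
      (fun (best : Int) (j : Nat) =>
        if PySem.List.slice pre (some (j : Int)) (some ((j : Int) + 5)) = "<w:p>".toList ∨
           PySem.List.slice pre (some (j : Int)) (some ((j : Int) + 5)) = "<w:p ".toList
        then (j : Int) else best) (-1) := by
  have ra : PySem.Chars.rfind pre "<w:p>".toList = pvLM (pvP pre) (pre.length + 1) :=
    pvRfind_eq pre _
  have rb : PySem.Chars.rfind pre "<w:p ".toList = pvLM (pvQ pre) (pre.length + 1) :=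
    pvRfind_eq pre _
  rw [ra, rb, pvMaxStep _ _ (pvLM_neg_one_le _ _) (pvLM_neg_one_le _ _), ← pvLM_or]
  have hfalse : ∀ j, pre.length - 4 ≤ j → (pvP pre j || pvQ pre j) = false := by
    intro j hj
    have hnp : ∀ lit : List Char, lit.length = 5 → lit.isPrefixOf (pre.drop j) = false := by
      intro lit hlit
      by_contra hcon
      have htr : lit.isPrefixOf (pre.drop j) = true := by
        cases hb : lit.isPrefixOf (pre.drop j) <;> simp_all
      have := (List.isPrefixOf_iff_prefix.mp htr).length_le
      rw [List.length_drop] at this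
      omega
    simp only [pvP, pvQ, Bool.or_eq_false_iff]
    exact ⟨hnp _ rfl, hnp _ rfl⟩
  rw [pvLM_trunc _ (pre.length - 4) hfalse (pre.length + 1) (by omega)]
  unfold pvLM
  apply PySem.List.foldl_congr_mem
  intro acc j _
  refine if_congr ?_ rfl rfl
  rw [pvCond_eq pre "<w:p>".toList rfl j, pvCond_eq pre "<w:p ".toList rfl j]
  simp [pvP, pvQ]

-- ===== VERDICT (by name: the statement is the Claim_ definition above) =====
theorem find_p_for_anchor_spec : Claim_equal_find_p_for_anchor := by
  intro xml anchor _
  unfold Spec_find_p_for_anchor find_p_for_anchor find_p_for_anchor_alt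
  simp only [PySem.Str.find_eq, PySem.Str.rfindFrom_eq]
  by_cases h : PySem.Chars.find xml.toList anchor.toList = -1
  · simp [h]
  · simp only [h, if_false]
    have hge : 0 ≤ PySem.Chars.find xml.toList anchor.toList := by
      have := PySem.Chars.neg_one_le_find xml.toList anchor.toList
      omega
    have hle := PySem.Chars.find_le_length xml.toList anchor.toList
    have hrf1 := pvRfindFrom_eq_rfind xml.toList "<w:p>".toList _ hge hle
    have hrf2 := pvRfindFrom_eq_rfind xml.toList "<w:p ".toList _ hge hle
    have hslice : PySem.List.slice xml.toList none
        (some (PySem.Chars.find xml.toList anchor.toList)) =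
        List.take (PySem.Chars.find xml.toList anchor.toList).toNat xml.toList :=
      PySem.List.slice_to _ hge
    simp only [hrf1, hrf2, hslice]
    exact pvCore _
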